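-- pv_equiv track=rewrite | github.com/Valeopenitus/Fracture | Fracture.py | _is_divider_line
-- ===== SOURCE A (Python) =====
-- MIN_DIVIDER_LEN = 20
--
-- def _is_divider_line(line: str) -> tuple[bool, str]:
--     s = line.rstrip("\n")
--     if not s.lstrip().startswith("#"):
--         return (False, "")
--     after_hash = s.lstrip()[1:].strip()
--     if len(after_hash) < MIN_DIVIDER_LEN:
--         return (False, "")
--     ch = after_hash[0]
--     if ch not in "=~-_":
--         return (False, "")
--     if all(c == ch for c in after_hash):
--         return (True, ch)
--     return (False, "")
-- ===== SOURCE B (Python) =====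
-- MIN_DIVIDER_LEN = 20
--
-- def _is_divider_line(line: str) -> tuple[bool, str]:
--     i, n = 0, len(line)
--     while i < n and line[i].isspace():
--         i += 1
--     if i == n or line[i] != "#":
--         return (False, "")
--     i += 1
--     while i < n and line[i].isspace():
--         i += 1
--     if i == n or line[i] not in "=~-_":
--         return (False, "")
--     ch = line[i]
--     count = 0
--     while i < n and line[i] == ch:
--         count += 1
--         i += 1
--     while i < n and line[i].isspace():
--         i += 1
--     if i == n and count >= MIN_DIVIDER_LEN:
--         return (True, ch)
--     return (False, "")
-- ===== Notes on version B (the rewrite author's own statement) =====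
-- stated objective: alternative
-- what changed: A validates by building intermediate strings (rstrip/lstrip/slice/strip) and then an all-equal scan; B is a single left-to-right state-machine pass over the characters (skip whitespace, expect '#', skip whitespace, count the divider-char run, skip trailing whitespace, expect end of line) with no intermediate strings.
import Mathlib
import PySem

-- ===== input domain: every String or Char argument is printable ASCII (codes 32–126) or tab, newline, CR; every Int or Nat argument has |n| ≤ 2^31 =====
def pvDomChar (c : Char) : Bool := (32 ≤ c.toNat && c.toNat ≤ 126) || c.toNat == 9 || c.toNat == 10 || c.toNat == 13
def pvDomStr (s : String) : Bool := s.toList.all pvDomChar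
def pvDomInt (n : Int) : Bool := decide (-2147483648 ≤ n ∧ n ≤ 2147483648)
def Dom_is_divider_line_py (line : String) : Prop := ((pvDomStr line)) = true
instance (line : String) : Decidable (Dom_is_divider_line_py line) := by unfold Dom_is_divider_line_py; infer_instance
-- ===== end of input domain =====

-- B replaces A's chain of strip/startswith/slice/all string passes by a single left-to-right
-- state-machine scan (skip ws, '#', skip ws, count divider run, skip ws, expect end); alternative, not claimed faster.


-- ===== PORT A =====
-- MIN_DIVIDER_LEN = 20 appears as the literal 20 below.
def is_divider_line_py (line : String) : Bool × String :=
  -- s = line.rstrip("\n"): rstrip with a chars argument has no PySem primitive; ported by hand,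
  -- dropping exactly the trailing run of '\n' characters (exact for this call).
  let s : List Char := (List.dropWhile (fun c => c == '\n') line.toList.reverse).reverse
  if !(PySem.Chars.startswith (PySem.Chars.lstrip s) ['#']) then (false, "")
  else
    let after_hash := PySem.Chars.strip (PySem.List.slice (PySem.Chars.lstrip s) (some 1) none)
    if after_hash.length < 20 then (false, "")
    else
      match PySem.List.pyGet? after_hash 0 with
      | none => (false, "")   -- unreachable: after_hash has length ≥ 20
      | some ch =>
        -- ch not in "=~-_" : substring membership of the one-char string [ch]
        if !(PySem.Chars.isIn [ch] "=~-_".toList) then (false, "")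
        else if after_hash.all (fun c => c == ch) then (true, String.mk [ch])
        else (false, "")

-- ===== PORT B =====
-- while i < n and line[i].isspace(): i += 1   — the remaining suffix after the loop
def altSkipWs : List Char → List Char
  | [] => []
  | c :: rest => if PySem.Chars.isspace c then altSkipWs rest else c :: rest

-- while i < n and line[i] == ch: count += 1; i += 1   — (count, remaining suffix)
def altRun (ch : Char) : List Char → Nat × List Char
  | [] => (0, [])
  | c :: rest =>
    if c == ch then
      let p := altRun ch rest
      (p.1 + 1, p.2)
    else (0, c :: rest)

def is_divider_line_py_alt (line : String) : Bool × String :=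
  match altSkipWs line.toList with
  | [] => (false, "")
  | c :: rest =>
    if c ≠ '#' then (false, "")
    else
      match altSkipWs rest with
      | [] => (false, "")
      | d :: rest2 =>
        if !(PySem.Chars.isIn [d] "=~-_".toList) then (false, "")
        else
          match altRun d (d :: rest2) with
          | (count, r) => if altSkipWs r = [] ∧ 20 ≤ count then (true, String.mk [d]) else (false, "")

-- ===== PRECONDITION & SPEC =====
def Spec_is_divider_line_py (line : String) (out : Bool × String) : Prop := out = is_divider_line_py_alt line
instance (line : String) (out : Bool × String) : Decidable (Spec_is_divider_line_py line out) := by unfold Spec_is_divider_line_py; infer_instance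

-- ===== CLAIM (what is proved, stated in full; the proofs are below) =====
def Claim_equal_is_divider_line_py : Prop := ∀ (line : String), Dom_is_divider_line_py line → Spec_is_divider_line_py line (is_divider_line_py line)

-- ===== LEMMAS AND PROOFS =====

theorem altSkipWs_eq (l : List Char) : altSkipWs l = List.dropWhile PySem.Chars.isspace l := by
  induction l with
  | nil => rfl
  | cons c rest ih => simp [altSkipWs, List.dropWhile_cons, ih]

theorem altRun_eq (ch : Char) (l : List Char) :
    altRun ch l = ((List.takeWhile (· == ch) l).length, List.dropWhile (· == ch) l) := by
  induction l with
  | nil => rfl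
  | cons c rest ih =>
    by_cases h : c = ch
    · subst h; simp [altRun, ih]
    · simp [altRun, h]

theorem dropWhile_all_false {p : Char → Bool} {l : List Char}
    (h : ∀ x ∈ l, p x = false) : List.dropWhile p l = l := by
  cases l with
  | nil => rfl
  | cons c rest => simp [h c (by simp)]

theorem rdropWhile_all_false {p : Char → Bool} {l : List Char}
    (h : ∀ x ∈ l, p x = false) : List.rdropWhile p l = l := by
  unfold List.rdropWhile
  rw [dropWhile_all_false (by intro x hx; exact h x (List.mem_reverse.mp hx))]
  exact List.reverse_reverse l

theorem dropWhile_all_true {p : Char → Bool} {xs ys : List Char}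
    (h : ∀ x ∈ xs, p x = true) : List.dropWhile p (xs ++ ys) = List.dropWhile p ys := by
  rw [List.dropWhile_append, List.dropWhile_eq_nil_iff.mpr h]
  simp

theorem rdrop_cons {p : Char → Bool} {c : Char} (l : List Char)
    (h : p c = false) : List.rdropWhile p (c :: l) = c :: List.rdropWhile p l := by
  unfold List.rdropWhile
  rw [show (c :: l).reverse = l.reverse ++ [c] from by simp, List.dropWhile_append]
  by_cases hd : List.dropWhile p l.reverse = []
  · simp [hd, h]
  · simp only [List.isEmpty_iff, hd, if_false]
    simp

theorem rdrop_append_all {p : Char → Bool} {xs ys : List Char}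
    (h : ∀ y ∈ ys, p y = true) : List.rdropWhile p (xs ++ ys) = List.rdropWhile p xs := by
  unfold List.rdropWhile
  rw [List.reverse_append, dropWhile_all_true (by intro x hx; exact h x (List.mem_reverse.mp hx))]

theorem dropWhile_dropWhile {p q : Char → Bool} (l : List Char)
    (h : ∀ c, q c = true → p c = true) :
    List.dropWhile p (List.dropWhile q l) = List.dropWhile p l := by
  induction l with
  | nil => rfl
  | cons c rest ih =>
    by_cases hq : q c = true
    · rw [List.dropWhile_cons_of_pos hq, ih, List.dropWhile_cons_of_pos (h c hq)]
    · rw [List.dropWhile_cons_of_neg hq]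

theorem rdrop_rdrop {p q : Char → Bool} (l : List Char)
    (h : ∀ c, q c = true → p c = true) :
    List.rdropWhile p (List.rdropWhile q l) = List.rdropWhile p l := by
  unfold List.rdropWhile
  rw [List.reverse_reverse, dropWhile_dropWhile _ h]

theorem rdrop_append_ne {p : Char → Bool} (xs ys : List Char) (h : List.rdropWhile p ys ≠ []) :
    List.rdropWhile p (xs ++ ys) = xs ++ List.rdropWhile p ys := by
  unfold List.rdropWhile at *
  rw [List.reverse_append, List.dropWhile_append]
  have hne : ¬ (List.dropWhile p ys.reverse).isEmpty = true := by
    simp only [List.isEmpty_iff]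
    intro he; apply h; rw [he]; rfl
  rw [if_neg hne, List.reverse_append, List.reverse_reverse]

theorem drop_rdrop_comm {p q : Char → Bool} (l : List Char)
    (h : ∀ c, q c = true → p c = true) :
    List.dropWhile p (List.rdropWhile q l) = List.rdropWhile q (List.dropWhile p l) := by
  cases hw : List.dropWhile p l with
  | nil =>
    have hall : ∀ x ∈ l, p x = true := List.dropWhile_eq_nil_iff.mp hw
    have hpre := List.rdropWhile_prefix q l
    have hsub : ∀ x ∈ List.rdropWhile q l, p x = true := by
      intro x hx; exact hall x (hpre.subset hx)
    rw [List.dropWhile_eq_nil_iff.mpr hsub]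
    simp [List.rdropWhile]
  | cons c v =>
    have hc : p c = false := by
      have hself : List.dropWhile p (c :: v) = c :: v := by
        rw [← hw, dropWhile_dropWhile l (fun c hc => hc)]
      by_contra hcp
      simp only [Bool.not_eq_false] at hcp
      rw [List.dropWhile_cons_of_pos hcp] at hself
      have := congrArg List.length hself
      simp at this
      have := List.length_dropWhile_le p v
      omega
    have hqc : q c = false := by
      by_contra hq
      simp only [Bool.not_eq_false] at hq
      rw [h c hq] at hc; exact Bool.true_eq_false.mp hc
    have hsplit : List.takeWhile p l ++ (c :: v) = l := by
      rw [← hw]; exact List.takeWhile_append_dropWhile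
    have hne : List.rdropWhile q (c :: v) ≠ [] := by
      rw [rdrop_cons v hqc]; simp
    rw [← hsplit, rdrop_append_ne _ _ hne,
      dropWhile_all_true (fun x hx => List.mem_takeWhile_imp hx),
      rdrop_cons v hqc, List.dropWhile_cons_of_neg (by simp [hc])]

theorem nl_ws : ∀ c : Char, (c == '\n') = true → PySem.Chars.isspace c = true := by
  intro c hc
  have : c = '\n' := by simpa using hc
  subst this; decide

theorem slice_one (xs : List Char) : PySem.List.slice xs (some 1) none = xs.drop 1 := by
  cases xs with
  | nil => rfl
  | cons a l =>
    simp [PySem.List.slice, PySem.List.clampIdx]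

theorem lstrip_eq (s : List Char) : PySem.Chars.lstrip s = List.dropWhile PySem.Chars.isspace s := rfl

theorem strip_eq (s : List Char) :
    PySem.Chars.strip s = List.rdropWhile PySem.Chars.isspace (List.dropWhile PySem.Chars.isspace s) := rfl

-- the core equivalence of the two run/length/all-equal tests
theorem key_iff (d : Char) (u : List Char) (hd : PySem.Chars.isspace d = false) :
    ((¬ (List.rdropWhile PySem.Chars.isspace (d :: u)).length < 20) ∧
      (∀ x ∈ List.rdropWhile PySem.Chars.isspace (d :: u), x = d)) ↔
    (List.dropWhile PySem.Chars.isspace (List.dropWhile (· == d) (d :: u)) = [] ∧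
      20 ≤ (List.takeWhile (· == d) (d :: u)).length) := by
  constructor
  · rintro ⟨hlen, hall⟩
    have hsplit : List.rdropWhile PySem.Chars.isspace (d :: u) ++ List.rtakeWhile PySem.Chars.isspace (d :: u) = d :: u :=
      List.rdropWhile_append_rtakeWhile
    set aft := List.rdropWhile PySem.Chars.isspace (d :: u) with haft
    set sfx := List.rtakeWhile PySem.Chars.isspace (d :: u) with hsfx
    have hsfx_ws : ∀ x ∈ sfx, PySem.Chars.isspace x = true := fun x hx => List.mem_rtakeWhile_imp hx
    have hsfx_ne_d : ∀ x ∈ sfx, (x == d) = false := by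
      intro x hx
      by_contra hxd
      simp only [Bool.not_eq_false, beq_iff_eq] at hxd
      subst hxd
      rw [hsfx_ws x hx] at hd; exact Bool.true_eq_false.mp hd
    have hdropd : List.dropWhile (· == d) (d :: u) = sfx := by
      rw [← hsplit, dropWhile_all_true (by intro x hx; simp [hall x hx]),
        dropWhile_all_false hsfx_ne_d]
    have htaked : (List.takeWhile (· == d) (d :: u)).length = aft.length := by
      have h1 := congrArg List.length (List.takeWhile_append_dropWhile (p := (· == d)) (l := d :: u))
      have h2 := congrArg List.length hsplit
      rw [hdropd] at h1
      simp only [List.length_append] at h1 h2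
      omega
    refine ⟨?_, by omega⟩
    rw [hdropd]
    exact List.dropWhile_eq_nil_iff.mpr hsfx_ws
  · rintro ⟨hws, hlen⟩
    have hsplit : List.takeWhile (· == d) (d :: u) ++ List.dropWhile (· == d) (d :: u) = d :: u :=
      List.takeWhile_append_dropWhile
    set tw := List.takeWhile (· == d) (d :: u) with htw
    set r3 := List.dropWhile (· == d) (d :: u) with hr3
    have hr3_ws : ∀ x ∈ r3, PySem.Chars.isspace x = true := List.dropWhile_eq_nil_iff.mp hws
    have htw_d : ∀ x ∈ tw, x = d := by
      intro x hx
      have := List.mem_takeWhile_imp hx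
      simpa using this
    have haft : List.rdropWhile PySem.Chars.isspace (d :: u) = tw := by
      rw [← hsplit, rdrop_append_all hr3_ws, rdropWhile_all_false (by
        intro x hx; rw [htw_d x hx]; exact hd)]
    rw [haft]
    exact ⟨by omega, htw_d⟩

set_option maxHeartbeats 1000000 in
theorem main_eq (line : String) : is_divider_line_py line = is_divider_line_py_alt line := by
  unfold is_divider_line_py is_divider_line_py_alt
  simp only [altSkipWs_eq]
  rw [lstrip_eq, strip_eq]
  rw [show (List.dropWhile (fun c => c == '\n') line.toList.reverse).reverse
      = List.rdropWhile (fun c => c == '\n') line.toList from rfl]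
  rw [drop_rdrop_comm line.toList nl_ws]
  cases hw : List.dropWhile PySem.Chars.isspace line.toList with
  | nil =>
    simp [List.rdropWhile, PySem.Chars.startswith]
  | cons c v =>
    have hcws : PySem.Chars.isspace c = false := by
      have hself : List.dropWhile PySem.Chars.isspace (c :: v) = c :: v := by
        rw [← hw, dropWhile_dropWhile line.toList (fun c hc => hc)]
      by_contra hcp
      simp only [Bool.not_eq_false] at hcp
      rw [List.dropWhile_cons_of_pos hcp] at hself
      have := congrArg List.length hself
      simp at this
      have := List.length_dropWhile_le PySem.Chars.isspace v
      omega
    have hcnl : (c == '\n') = false := by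
      by_contra h
      simp only [Bool.not_eq_false] at h
      rw [nl_ws c h] at hcws; exact Bool.true_eq_false.mp hcws
    rw [rdrop_cons (p := fun c => c == '\n') v hcnl]
    simp only []
    by_cases hc : c = '#'
    · subst hc
      have hpre : PySem.Chars.startswith ('#' :: List.rdropWhile (fun c => c == '\n') v) ['#'] = true := by
        simp [PySem.Chars.startswith, List.isPrefixOf]
      rw [hpre]
      simp only [Bool.not_true, Bool.false_eq_true, if_false]
      rw [if_neg (show ¬ ('#' ≠ '#') by simp)]
      rw [slice_one]
      simp only [List.drop_succ_cons, List.drop_zero]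
      simp only [drop_rdrop_comm v nl_ws, rdrop_rdrop _ nl_ws]
      cases hu : List.dropWhile PySem.Chars.isspace v with
      | nil =>
        simp [List.rdropWhile]
      | cons d u' =>
        have hdws : PySem.Chars.isspace d = false := by
          have hself : List.dropWhile PySem.Chars.isspace (d :: u') = d :: u' := by
            rw [← hu, dropWhile_dropWhile v (fun c hc => hc)]
          by_contra hcp
          simp only [Bool.not_eq_false] at hcp
          rw [List.dropWhile_cons_of_pos hcp] at hself
          have := congrArg List.length hself
          simp at this
          have := List.length_dropWhile_le PySem.Chars.isspace u'
          omega
        rw [rdrop_cons (p := PySem.Chars.isspace) u' hdws]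
        simp only []
        have hget : PySem.List.pyGet? (d :: List.rdropWhile PySem.Chars.isspace u') (0 : Int)
            = some d := by
          simp [PySem.List.pyGet?, PySem.List.pyIdx?]
        rw [hget]
        by_cases hin : PySem.Chars.isIn [d] "=~-_".toList = true
        · simp only [hin, Bool.not_true, Bool.false_eq_true, if_false, altRun_eq]
          have hk := key_iff d u' hdws
          rw [rdrop_cons u' hdws] at hk
          by_cases hacc : (¬ (d :: List.rdropWhile PySem.Chars.isspace u').length < 20) ∧
              (∀ x ∈ d :: List.rdropWhile PySem.Chars.isspace u', x = d)
          · have hrhs := hk.mp hacc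
            rw [if_neg (by omega), if_pos (by
              simp only [List.all_eq_true, beq_iff_eq]; exact hacc.2)]
            rw [if_pos ⟨hrhs.1, hrhs.2⟩]
          · rw [Classical.not_and_iff_not_or_not] at hacc
            have hnr : ¬ (List.dropWhile PySem.Chars.isspace (List.dropWhile (· == d) (d :: u')) = [] ∧
                20 ≤ (List.takeWhile (· == d) (d :: u')).length) := by
              intro hr
              rcases hacc with h1 | h2
              · exact h1 (hk.mpr hr).1
              · exact h2 (hk.mpr hr).2
            rw [if_neg hnr]
            rcases hacc with h1 | h2
            · rw [if_pos (by omega)]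
            · by_cases hlen : (d :: List.rdropWhile PySem.Chars.isspace u').length < 20
              · rw [if_pos hlen]
              · rw [if_neg hlen, if_neg (by
                  simp only [List.all_eq_true, beq_iff_eq]
                  exact h2)]
        · simp only [Bool.not_eq_true] at hin
          rw [hin]
          have hin' : PySem.Chars.isIn [d] ['=', '~', '-', '_'] = false := hin
          simp [hin']
    · have hpre : PySem.Chars.startswith (c :: List.rdropWhile (fun c => c == '\n') v) ['#'] = false := by
        simp [PySem.Chars.startswith, List.isPrefixOf]
        exact fun h => hc h.symm
      simp [hpre, hc]

-- ===== VERDICT (by name: the statement is the Claim_ definition above) =====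
theorem is_divider_line_py_spec : Claim_equal_is_divider_line_py := by
  intro line _
  unfold Spec_is_divider_line_py
  exact main_eq line
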